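-- pv_equiv track=rewrite | github.com/miliar/Code_Jam_Webscraper | solutions_python/solutions_year15_round0_nr1/1253.py | solve
-- ===== SOURCE A (Python) =====
-- def solve(shyness):
--     clapping = 0
--     invited = 0
--     for shy, c in enumerate(shyness):
--         i = ord(c) - ord('0')
--         add = max(shy - clapping, 0)
--         invited += add
--         clapping += add + i
--     return invited
-- ===== SOURCE B (Python) =====
-- def solve(shyness):
--     # Stage 1: prefix[i] = number of people clapping after the first i groups (no invites).
--     prefix = [0]
--     for c in shyness:
--         prefix.append(prefix[-1] + ord(c) - ord('0'))
--     # Stage 2: the answer is the largest prefix deficit max(0, max_i (i - prefix[i])).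
--     best = 0
--     i = 0
--     for seen in prefix[:-1]:
--         if i - seen > best:
--             best = i - seen
--         i += 1
--     return best
-- ===== Notes on version B (the rewrite author's own statement) =====
-- stated objective: alternative
-- what changed: B replaces A's single-pass bump-and-accumulate simulation (clapping/invited/add) by two staged passes: it first materialises the list of prefix digit sums, then scans it for the maximum prefix deficit max(0, max_i (i - prefix[i])), which equals the number of invitees.
import Mathlib
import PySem

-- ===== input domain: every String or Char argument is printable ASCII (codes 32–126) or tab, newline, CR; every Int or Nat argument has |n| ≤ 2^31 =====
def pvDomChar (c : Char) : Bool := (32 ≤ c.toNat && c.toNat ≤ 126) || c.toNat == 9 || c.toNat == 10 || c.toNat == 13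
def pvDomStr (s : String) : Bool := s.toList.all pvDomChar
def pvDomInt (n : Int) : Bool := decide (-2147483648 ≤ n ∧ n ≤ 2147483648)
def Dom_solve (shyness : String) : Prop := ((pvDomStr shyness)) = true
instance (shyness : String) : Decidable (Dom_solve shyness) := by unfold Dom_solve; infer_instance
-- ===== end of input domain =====

-- B replaces A's bump-and-accumulate simulation by two staged passes: it first builds
-- the list of prefix digit sums, then scans it for the maximum prefix deficit
-- (objective: alternative).


-- ===== PORT A =====
-- single pass over enumerate(shyness); state = (clapping, invited),
-- per step: add = max(shy - clapping, 0)
def solve (shyness : String) : Int :=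
  ((PySem.List.enumerate shyness.toList).foldl
    (fun (st : Int × Int) (p : Int × Char) =>
      let i : Int := (p.2.toNat : Int) - ('0'.toNat : Int)
      let add : Int := max (p.1 - st.1) 0
      (st.1 + add + i, st.2 + add)) (0, 0)).2

-- ===== PORT B =====
-- stage 1 builds the prefix-sum list (prefix[-1] ported as getLastD 0: the list starts
-- as [0] and only grows, so it is never empty); stage 2 scans prefix[:-1] (= dropLast)
-- with state (best, i) for the maximum prefix deficit
def solve_alt (shyness : String) : Int :=
  let pre := shyness.toList.foldl
    (fun (acc : List Int) c =>
      acc ++ [acc.getLastD 0 + ((c.toNat : Int) - ('0'.toNat : Int))]) [0]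
  (pre.dropLast.foldl
    (fun (st : Int × Int) seen =>
      (if st.2 - seen > st.1 then st.2 - seen else st.1, st.2 + 1)) (0, 0)).1

-- ===== PRECONDITION & SPEC =====
def Spec_solve (shyness : String) (out : Int) : Prop := out = solve_alt shyness
instance (shyness : String) (out : Int) : Decidable (Spec_solve shyness out) := by unfold Spec_solve; infer_instance

-- ===== CLAIM (what is proved, stated in full; the proofs are below) =====
def Claim_equal_solve : Prop := ∀ (shyness : String), Dom_solve shyness → Spec_solve shyness (solve shyness)

-- ===== LEMMAS AND PROOFS =====

-- the prefix-sum tail that stage 1 of B produces after a start value v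
def pvRest (v : Int) : List Char → List Int
  | [] => []
  | c :: cs => (v + ((c.toNat : Int) - ('0'.toNat : Int))) :: pvRest (v + ((c.toNat : Int) - ('0'.toNat : Int))) cs

-- stage 1 of B computes acc ++ pvRest (last of acc)
theorem pv_build (cs : List Char) : ∀ (acc : List Int), acc ≠ [] →
    cs.foldl (fun (acc : List Int) c =>
        acc ++ [acc.getLastD 0 + ((c.toNat : Int) - ('0'.toNat : Int))]) acc
    = acc ++ pvRest (acc.getLastD 0) cs := by
  induction cs with
  | nil => intro acc _; simp [pvRest]
  | cons c cs ih =>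
      intro acc hacc
      simp only [List.foldl_cons]
      rw [ih (acc ++ [acc.getLastD 0 + ((c.toNat : Int) - ('0'.toNat : Int))]) (by simp)]
      simp [pvRest]

-- Loop relation: A's fold over enumerate cs i from (cl, inv) returns (in .2) the same
-- value as B's stage-2 fold over (v :: pvRest v cs).dropLast from (best, i) (in .1),
-- under the invariant inv = best ∧ cl = best + v.
theorem pv_fold_rel (cs : List Char) : ∀ (i v cl inv best : Int),
    inv = best → cl = best + v →
    ((PySem.List.enumerate cs i).foldl
      (fun (st : Int × Int) (p : Int × Char) =>
        let d : Int := (p.2.toNat : Int) - ('0'.toNat : Int)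
        let add : Int := max (p.1 - st.1) 0
        (st.1 + add + d, st.2 + add)) (cl, inv)).2
    = (((v :: pvRest v cs).dropLast).foldl
      (fun (st : Int × Int) seen =>
        (if st.2 - seen > st.1 then st.2 - seen else st.1, st.2 + 1)) (best, i)).1 := by
  induction cs with
  | nil => intro i v cl inv best h1 _; simpa [PySem.List.enumerate] using h1
  | cons c cs ih =>
      intro i v cl inv best h1 h2
      rw [PySem.List.enumerate_cons]
      simp only [pvRest, List.dropLast_cons₂, List.foldl_cons]
      exact ih (i + 1) (v + ((c.toNat : Int) - ('0'.toNat : Int))) _ _ _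
        (by subst h1 h2; split_ifs with h <;> omega)
        (by subst h1 h2; split_ifs with h <;> omega)

-- ===== VERDICT (by name: the statement is the Claim_ definition above) =====
theorem solve_spec : Claim_equal_solve := by
  intro s _
  unfold Spec_solve solve solve_alt
  rw [pv_build s.toList [0] (by simp)]
  simpa using pv_fold_rel s.toList 0 0 0 0 0 rfl (by ring)
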